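-- pv_equiv track=rewrite | github.com/skylarrwang/new_journal_all | pipeline/process_transcription.py | find_three_consecutive_headers
-- ===== SOURCE A (Python) =====
-- def find_three_consecutive_headers(text):
--     """Find the position of the first of three consecutive headers."""
--     lines = text.split('\n')
--     header_count = 0
--     first_header_pos = None
--
--     for i, line in enumerate(lines):
--         if line.strip().startswith('**') and line.strip().endswith('**'):
--             if header_count == 0:
--                 first_header_pos = i
--             header_count += 1
--             if header_count == 3:
--                 return first_header_pos
--         else:
--             header_count = 0
--             first_header_pos = None
--
--     return None
-- ===== SOURCE B (Python) =====
-- def find_three_consecutive_headers(text):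
--     """Find the position of the first of three consecutive headers."""
--     flags = [line.strip().startswith('**') and line.strip().endswith('**')
--              for line in text.split('\n')]
--     for i, (a, b, c) in enumerate(zip(flags, flags[1:], flags[2:])):
--         if a and b and c:
--             return i
--     return None
-- ===== Notes on version B (the rewrite author's own statement) =====
-- stated objective: alternative
-- what changed: Replaced the running header-counter/first-position state machine by precomputing a boolean header-flag table and scanning it with a sliding window of three.
import Mathlib
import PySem

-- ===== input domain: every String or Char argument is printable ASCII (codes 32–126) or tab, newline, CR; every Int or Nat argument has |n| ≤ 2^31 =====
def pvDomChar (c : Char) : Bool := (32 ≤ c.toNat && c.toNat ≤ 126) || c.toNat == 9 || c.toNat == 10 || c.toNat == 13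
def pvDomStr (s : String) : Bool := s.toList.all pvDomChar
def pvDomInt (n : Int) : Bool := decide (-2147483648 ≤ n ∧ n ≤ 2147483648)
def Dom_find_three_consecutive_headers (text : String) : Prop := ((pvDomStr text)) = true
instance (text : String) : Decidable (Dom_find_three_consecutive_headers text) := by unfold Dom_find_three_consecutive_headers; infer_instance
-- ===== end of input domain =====

-- B replaces A's running counter / first-position state machine by a precomputed
-- header-flag table scanned with a sliding window of three (alternative decomposition).

-- ===== PORT A =====
-- line.strip().startswith('**') and line.strip().endswith('**')
def pvHeaderLine (line : String) : Bool :=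
  PySem.Str.startswith (PySem.Str.strip line) "**" &&
  PySem.Str.endswith (PySem.Str.strip line) "**"

-- A's loop over enumerate(lines) with state (header_count, first_header_pos)
def pvGoA (lines : List String) (i : Int) (header_count : Nat)
    (first_header_pos : Option Int) : Option Int :=
  match lines with
  | [] => none
  | line :: rest =>
    if pvHeaderLine line then
      let pos' := if header_count = 0 then some i else first_header_pos
      let cnt' := header_count + 1
      if cnt' = 3 then pos'
      else pvGoA rest (i + 1) cnt' pos'
    else
      pvGoA rest (i + 1) 0 none

def find_three_consecutive_headers (text : String) : Option Int :=
  pvGoA ((PySem.Str.split? text "\n").getD []) 0 0 none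

-- ===== PORT B =====
-- for i, (a,b,c) in enumerate(zip(flags, flags[1:], flags[2:])): if a and b and c: return i
def pvGoB (flags : List Bool) (i : Int) : Option Int :=
  match flags with
  | a :: b :: c :: rest =>
    if a && b && c then some i else pvGoB (b :: c :: rest) (i + 1)
  | _ => none

def find_three_consecutive_headers_alt (text : String) : Option Int :=
  pvGoB (((PySem.Str.split? text "\n").getD []).map pvHeaderLine) 0

-- ===== PRECONDITION & SPEC =====
def Spec_find_three_consecutive_headers (text : String) (out : Option Int) : Prop := out = find_three_consecutive_headers_alt text
instance (text : String) (out : Option Int) : Decidable (Spec_find_three_consecutive_headers text out) := by unfold Spec_find_three_consecutive_headers; infer_instance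

-- ===== CLAIM (what is proved, stated in full; the proofs are below) =====
def Claim_equal_find_three_consecutive_headers : Prop := ∀ (text : String), Dom_find_three_consecutive_headers text → Spec_find_three_consecutive_headers text (find_three_consecutive_headers text)

-- ===== LEMMAS AND PROOFS =====

-- Skipping a false flag: the window scan can never fire on a window containing it.
theorem pvGoB_false_cons (bs : List Bool) (j : Int) :
    pvGoB (false :: bs) j = pvGoB bs (j + 1) := by
  match bs with
  | [] => simp [pvGoB]
  | [b] => simp [pvGoB]
  | b :: c :: rest => simp [pvGoB]

theorem pvGoB_skip (cnt : Nat) (hcnt : cnt ≤ 2) (bs : List Bool) (j : Int) :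
    pvGoB (List.replicate cnt true ++ false :: bs) j = pvGoB bs (j + cnt + 1) := by
  interval_cases cnt
  · simpa using pvGoB_false_cons bs j
  · match bs with
    | [] => simp [pvGoB]
    | b :: rest =>
      simp [pvGoB, pvGoB_false_cons]
  · match bs with
    | [] => simp [pvGoB]
    | [b] => simp [pvGoB]
    | b :: c :: rest =>
      simp [pvGoB]
      ring_nf

-- Main invariant: with cnt ∈ {0,1,2} pending consecutive headers just before the
-- current line, A's state machine equals B's window scan started at the first of them.
theorem pvGoA_eq_goB (ls : List String) : ∀ (i : Int) (cnt : Nat), cnt ≤ 2 →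
    pvGoA ls i cnt (if cnt = 0 then none else some (i - cnt))
      = pvGoB (List.replicate cnt true ++ ls.map pvHeaderLine) (i - cnt) := by
  induction ls with
  | nil =>
    intro i cnt hcnt
    interval_cases cnt <;> simp [pvGoA, pvGoB]
  | cons l rest ih =>
    intro i cnt hcnt
    by_cases hl : pvHeaderLine l = true
    · interval_cases cnt
      · have h := ih (i + 1) 1 (by omega)
        simp only [pvGoA, hl, if_true, List.map_cons]
        norm_num at h ⊢
        ring_nf at h ⊢
        exact h
      · have h := ih (i + 1) 2 (by omega)
        simp only [pvGoA, hl, if_true, List.map_cons]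
        norm_num [List.replicate] at h ⊢
        ring_nf at h ⊢
        exact h
      · simp only [pvGoA, hl, if_true, List.map_cons]
        norm_num [List.replicate, pvGoB]
    · have hfl : pvHeaderLine l = false := by simpa using hl
      have h := ih (i + 1) 0 (by omega)
      simp only [pvGoA, hfl, Bool.false_eq_true, if_false, List.map_cons]
      rw [pvGoB_skip cnt hcnt]
      norm_num at h
      rw [h]
      congr 1
      ring

-- ===== VERDICT (by name: the statement is the Claim_ definition above) =====
theorem find_three_consecutive_headers_spec : Claim_equal_find_three_consecutive_headers := by
  intro text _
  unfold Spec_find_three_consecutive_headers find_three_consecutive_headers find_three_consecutive_headers_alt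
  simpa using pvGoA_eq_goB ((PySem.Str.split? text "\n").getD []) 0 0 (by omega)
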